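-- pv_equiv track=rewrite | github.com/RusieckiRoland/LocalAI-RAG | tsql_summarizer/parsing.py | _slice_order_by_scoped
-- ===== SOURCE A (Python) =====
-- def _find_kw_level0_scoped(s: str, kw: str) -> int:
--     u, kwu = s.upper(), kw.upper()
--     lvl = 0
--     i = 0
--     while i < len(u):
--         ch = u[i]
--         if ch == '(':
--             lvl += 1
--         elif ch == ')':
--             lvl -= 1
--             if lvl < 0:
--                 return -1
--         if lvl == 0 and u.startswith(kwu, i):
--             return i
--         i += 1
--     return -1
--
-- def _slice_order_by_scoped(s: str) -> str:
--     pos = _find_kw_level0_scoped(s, " ORDER BY ")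
--     if pos < 0:
--         return ""
--     start = pos + len(" ORDER BY ")
--     u = s.upper()
--     lvl = 0
--     i = start
--     while i < len(s):
--         ch = s[i]
--         if ch == '(':
--             lvl += 1
--         elif ch == ')':
--             if lvl == 0:
--                 return s[start:i].strip()
--             lvl -= 1
--         elif lvl == 0:
--             for tok in [" OFFSET", " FETCH", " UNION", " EXCEPT", " INTERSECT", ";"]:
--                 if u.startswith(tok, i):
--                     return s[start:i].strip()
--         i += 1
--     return s[start:].strip()
-- ===== SOURCE B (Python) =====
-- KW = " ORDER BY "
-- TERMS = (" OFFSET", " FETCH", " UNION", " EXCEPT", " INTERSECT", ";")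
--
--
-- def _skip_group(s, i):
--     """s[i] == '('; return the index just past the matching ')' (len(s) if unmatched)."""
--     i += 1
--     n = len(s)
--     while i < n:
--         c = s[i]
--         if c == ')':
--             return i + 1
--         if c == '(':
--             i = _skip_group(s, i)
--         else:
--             i += 1
--     return n
--
--
-- def _slice_order_by_scoped(s):
--     u = s.upper()
--     n = len(s)
--     # phase 1: recursive-descent scan of the top level only; parenthesised
--     # groups are jumped over as whole units, so the keyword test never needs a depth counter
--     i, pos = 0, -1
--     while i < n:
--         c = u[i]
--         if c == ')':
--             return ""              # unmatched close before the keyword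
--         if c == '(':
--             i = _skip_group(u, i)
--         elif u.startswith(KW, i):
--             pos = i
--             break
--         else:
--             i += 1
--     if pos < 0:
--         return ""
--     # phase 2: same top-level scan for the end of the clause
--     start = pos + len(KW)
--     i = start
--     while i < n:
--         c = s[i]
--         if c == ')':
--             return s[start:i].strip()
--         if c == '(':
--             i = _skip_group(s, i)
--         elif any(u.startswith(t, i) for t in TERMS):
--             return s[start:i].strip()
--         else:
--             i += 1
--     return s[start:].strip()
-- ===== Notes on version B (the rewrite author's own statement) =====
-- stated objective: alternative
-- what changed: Replaces A's flat character scans that thread a paren-depth counter (and its negative-depth sentinel) through the keyword/terminator logic by a recursive-descent scanner: a recursive matching-close helper skips each balanced group as a whole unit, so the keyword search and the cut search only ever visit top-level positions and carry no depth state.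
import Mathlib
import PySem

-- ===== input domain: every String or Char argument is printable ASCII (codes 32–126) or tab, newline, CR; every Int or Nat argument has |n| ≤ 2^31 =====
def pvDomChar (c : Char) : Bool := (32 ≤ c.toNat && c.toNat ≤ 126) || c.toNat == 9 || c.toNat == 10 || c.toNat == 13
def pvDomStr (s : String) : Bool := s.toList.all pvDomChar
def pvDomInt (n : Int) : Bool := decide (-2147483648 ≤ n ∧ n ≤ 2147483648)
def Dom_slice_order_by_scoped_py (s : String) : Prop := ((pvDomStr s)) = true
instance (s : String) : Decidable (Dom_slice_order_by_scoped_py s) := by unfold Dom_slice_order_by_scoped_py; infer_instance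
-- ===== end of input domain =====

-- B replaces A's flat scans threading a paren-depth counter by a recursive-descent scanner:
-- balanced groups are skipped whole by a recursive matching-close helper, so the keyword and
-- terminator logic only ever sees top-level positions (objective: alternative decomposition).

-- ===== PORT A =====
-- while-loop of _find_kw_level0_scoped: structural recursion on the remaining suffix of u,
-- carrying the nesting level lvl and the absolute index i
def pvFindAux (kw : List Char) : List Char → Int → Nat → Int
  | [], _, _ => -1
  | ch :: tl, lvl, i =>
    let lvl' := if ch = '(' then lvl + 1 else if ch = ')' then lvl - 1 else lvl
    if ch = ')' ∧ lvl' < 0 then -1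
    else if lvl' = 0 ∧ PySem.Chars.startswith (ch :: tl) kw then (i : Int)
    else pvFindAux kw tl lvl' (i + 1)

-- second while-loop of _slice_order_by_scoped: ch is read from s, token tests on u
-- (the two suffixes advance in lockstep); returns the cut index, none = loop ran off the end
def pvCutAux (toks : List (List Char)) : List Char → List Char → Int → Nat → Option Nat
  | [], _, _, _ => none
  | ch :: tl, urest, lvl, i =>
    if ch = '(' then pvCutAux toks tl urest.tail (lvl + 1) (i + 1)
    else if ch = ')' then
      if lvl = 0 then some i else pvCutAux toks tl urest.tail (lvl - 1) (i + 1)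
    else if lvl = 0 ∧ toks.any (fun t => PySem.Chars.startswith urest t) then some i
    else pvCutAux toks tl urest.tail lvl (i + 1)

def slice_order_by_scoped_py (s : String) : String :=
  let kw := " ORDER BY ".toList   -- kw.upper() = kw: the keyword literal is already uppercase
  let sl := s.toList
  let u := PySem.Chars.upper sl
  let pos := pvFindAux kw u 0 0
  if pos < 0 then ""
  else
    let start := pos.toNat + kw.length
    let toks := [" OFFSET".toList, " FETCH".toList, " UNION".toList, " EXCEPT".toList, " INTERSECT".toList, ";".toList]
    match pvCutAux toks (sl.drop start) (u.drop start) 0 start with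
    | some i => String.ofList (PySem.Chars.strip (PySem.List.slice sl (some (start : Int)) (some (i : Int))))
    | none => String.ofList (PySem.Chars.strip (PySem.List.slice sl (some (start : Int)) none))

-- ===== PORT B =====
-- Source B's module constants KW and TERMS
def pvKW : List Char := " ORDER BY ".toList
def pvTOKS : List (List Char) :=
  [" OFFSET".toList, " FETCH".toList, " UNION".toList, " EXCEPT".toList, " INTERSECT".toList, ";".toList]

-- _skip_group, on the suffix AFTER the '(': returns (number of chars consumed, remaining suffix),
-- consuming up to and including the matching ')' (everything, if unmatched).  The subtype part
-- (consumed + rest = length) is the termination measure for the nested recursive call.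
def pvSgS : (l : List Char) → {p : Nat × List Char // p.1 + p.2.length = l.length}
  | [] => ⟨(0, []), rfl⟩
  | c :: tl =>
    if c = ')' then ⟨(1, tl), by simp only [List.length_cons]; omega⟩
    else if c = '(' then
      match pvSgS tl with
      | ⟨(k, r), h1⟩ =>
        match pvSgS r with
        | ⟨(k2, r2), h2⟩ =>
          ⟨(1 + k + k2, r2), by simp only [List.length_cons] at *; omega⟩
    else
      match pvSgS tl with
      | ⟨(k, r), h1⟩ => ⟨(1 + k, r), by simp only [List.length_cons] at *; omega⟩
termination_by l => l.length
decreasing_by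
  · simp only [List.length_cons]; omega
  · simp only [] at h1; simp only [List.length_cons]; omega
  · simp only [List.length_cons]; omega

-- phase-1 while loop of Source B: top-level scan for the keyword, jumping whole groups via pvSgS;
-- none models pos = -1 (covers both the unmatched-')' return and keyword-not-found)
def pvFind2 : List Char → Nat → Option Nat
  | [], _ => none
  | c :: tl, i =>
    if c = ')' then none
    else if c = '(' then
      pvFind2 (pvSgS tl).1.2 (i + 1 + (pvSgS tl).1.1)
    else if PySem.Chars.startswith (c :: tl) pvKW then some i
    else pvFind2 tl (i + 1)
termination_by l => l.length
decreasing_by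
  · have h1 := (pvSgS tl).2; simp only [List.length_cons]; omega
  · simp only [List.length_cons]; omega

-- phase-2 while loop of Source B: c is read from s, token tests on u (lockstep suffixes);
-- some i = cut index, none = loop ran off the end
def pvCut2 : List Char → List Char → Nat → Option Nat
  | [], _, _ => none
  | c :: tl, urest, i =>
    if c = ')' then some i
    else if c = '(' then
      pvCut2 (pvSgS tl).1.2 (urest.drop (1 + (pvSgS tl).1.1)) (i + 1 + (pvSgS tl).1.1)
    else if pvTOKS.any (fun t => PySem.Chars.startswith urest t) then some i
    else pvCut2 tl urest.tail (i + 1)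
termination_by l _ _ => l.length
decreasing_by
  · have h1 := (pvSgS tl).2; simp only [List.length_cons]; omega
  · simp only [List.length_cons]; omega

def slice_order_by_scoped_py_alt (s : String) : String :=
  let sl := s.toList
  let u := PySem.Chars.upper sl
  match pvFind2 u 0 with
  | none => ""
  | some p =>
    let start := p + pvKW.length
    match pvCut2 (sl.drop start) (u.drop start) start with
    | some i => String.ofList (PySem.Chars.strip (PySem.List.slice sl (some (start : Int)) (some (i : Int))))
    | none => String.ofList (PySem.Chars.strip (PySem.List.slice sl (some (start : Int)) none))

-- ===== PRECONDITION & SPEC =====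
def Spec_slice_order_by_scoped_py (s : String) (out : String) : Prop := out = slice_order_by_scoped_py_alt s
instance (s : String) (out : String) : Decidable (Spec_slice_order_by_scoped_py s out) := by unfold Spec_slice_order_by_scoped_py; infer_instance

-- ===== CLAIM (what is proved, stated in full; the proofs are below) =====
def Claim_equal_slice_order_by_scoped_py : Prop := ∀ (s : String), Dom_slice_order_by_scoped_py s → Spec_slice_order_by_scoped_py s (slice_order_by_scoped_py s)

-- ===== LEMMAS AND PROOFS =====

-- unfolding equations for pvSgS, one per branch
theorem pvSgS_nil : (pvSgS []).1 = (0, []) := by rw [pvSgS]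

theorem pvSgS_rparen (tl : List Char) : (pvSgS (')' :: tl)).1 = (1, tl) := by
  rw [pvSgS]; simp

theorem pvSgS_lparen (tl : List Char) :
    (pvSgS ('(' :: tl)).1 =
      (1 + (pvSgS tl).1.1 + (pvSgS (pvSgS tl).1.2).1.1, (pvSgS (pvSgS tl).1.2).1.2) := by
  rw [pvSgS]; simp

theorem pvSgS_other (c : Char) (tl : List Char) (h1 : ¬ c = ')') (h2 : ¬ c = '(') :
    (pvSgS (c :: tl)).1 = (1 + (pvSgS tl).1.1, (pvSgS tl).1.2) := by
  rw [pvSgS]; simp [h1, h2]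

theorem pvTailDrop {α : Type} (l : List α) (k : Nat) : (l.tail).drop k = l.drop (k + 1) := by
  rw [← List.drop_one, List.drop_drop, Nat.add_comm]

-- the keyword starts with ' ', so it never matches at a paren
theorem pvSW_rparen (tl : List Char) : PySem.Chars.startswith (')' :: tl) pvKW = false := by
  simp [PySem.Chars.startswith, pvKW, List.isPrefixOf]

theorem pvSW_lparen (tl : List Char) : PySem.Chars.startswith ('(' :: tl) pvKW = false := by
  simp [PySem.Chars.startswith, pvKW, List.isPrefixOf]

-- one-step equations for A's phase-1 loop, per character class
theorem pvFindAux_rparen (tl : List Char) (lvl : Int) (j : Nat) :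
    pvFindAux pvKW (')' :: tl) lvl j
      = if lvl - 1 < 0 then -1 else pvFindAux pvKW tl (lvl - 1) (j + 1) := by
  simp [pvFindAux, pvSW_rparen]

theorem pvFindAux_lparen (tl : List Char) (lvl : Int) (j : Nat) :
    pvFindAux pvKW ('(' :: tl) lvl j = pvFindAux pvKW tl (lvl + 1) (j + 1) := by
  simp [pvFindAux, pvSW_lparen]

theorem pvFindAux_other (c : Char) (tl : List Char) (lvl : Int) (j : Nat)
    (h1 : ¬ c = ')') (h2 : ¬ c = '(') :
    pvFindAux pvKW (c :: tl) lvl j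
      = if lvl = 0 ∧ PySem.Chars.startswith (c :: tl) pvKW then (j : Int)
        else pvFindAux pvKW tl lvl (j + 1) := by
  simp [pvFindAux, h1, h2]

-- one-step equations for Source B's phase-1 jump scan
theorem pvFind2_rparen (tl : List Char) (j : Nat) : pvFind2 (')' :: tl) j = none := by
  rw [pvFind2]; simp

theorem pvFind2_lparen (tl : List Char) (j : Nat) :
    pvFind2 ('(' :: tl) j = pvFind2 (pvSgS tl).1.2 (j + 1 + (pvSgS tl).1.1) := by
  rw [pvFind2]; simp

theorem pvFind2_other (c : Char) (tl : List Char) (j : Nat) (h1 : ¬ c = ')') (h2 : ¬ c = '(') :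
    pvFind2 (c :: tl) j
      = if PySem.Chars.startswith (c :: tl) pvKW then some j else pvFind2 tl (j + 1) := by
  rw [pvFind2]; simp [h1, h2]

-- one-step equations for A's phase-2 loop
theorem pvCutAux_lparen (tl urest : List Char) (lvl : Int) (j : Nat) :
    pvCutAux pvTOKS ('(' :: tl) urest lvl j
      = pvCutAux pvTOKS tl urest.tail (lvl + 1) (j + 1) := by
  simp [pvCutAux]

theorem pvCutAux_rparen (tl urest : List Char) (lvl : Int) (j : Nat) :
    pvCutAux pvTOKS (')' :: tl) urest lvl j
      = if lvl = 0 then some j else pvCutAux pvTOKS tl urest.tail (lvl - 1) (j + 1) := by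
  simp [pvCutAux]

theorem pvCutAux_other (c : Char) (tl urest : List Char) (lvl : Int) (j : Nat)
    (h1 : ¬ c = ')') (h2 : ¬ c = '(') :
    pvCutAux pvTOKS (c :: tl) urest lvl j
      = if lvl = 0 ∧ pvTOKS.any (fun t => PySem.Chars.startswith urest t) then some j
        else pvCutAux pvTOKS tl urest.tail lvl (j + 1) := by
  simp [pvCutAux, h1, h2]

-- one-step equations for Source B's phase-2 jump scan
theorem pvCut2_rparen (tl urest : List Char) (j : Nat) :
    pvCut2 (')' :: tl) urest j = some j := by
  rw [pvCut2]; simp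

theorem pvCut2_lparen (tl urest : List Char) (j : Nat) :
    pvCut2 ('(' :: tl) urest j
      = pvCut2 (pvSgS tl).1.2 (urest.drop (1 + (pvSgS tl).1.1)) (j + 1 + (pvSgS tl).1.1) := by
  rw [pvCut2]; simp

theorem pvCut2_other (c : Char) (tl urest : List Char) (j : Nat)
    (h1 : ¬ c = ')') (h2 : ¬ c = '(') :
    pvCut2 (c :: tl) urest j
      = if pvTOKS.any (fun t => PySem.Chars.startswith urest t) then some j
        else pvCut2 tl urest.tail (j + 1) := by
  rw [pvCut2]; simp [h1, h2]

-- argument-congruence helpers (the two sides arrange the same Nat sums differently)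
theorem pvCutCongr (l u u' : List Char) (lvl : Int) (i i' : Nat) (hu : u = u') (hi : i = i') :
    pvCutAux pvTOKS l u lvl i = pvCutAux pvTOKS l u' lvl i' := by rw [hu, hi]

theorem pvCut2Congr (l u u' : List Char) (i i' : Nat) (hu : u = u') (hi : i = i') :
    pvCut2 l u i = pvCut2 l u' i' := by rw [hu, hi]

-- A's phase-1 loop at depth d+1 just skips the current group: it equals the loop resumed
-- at depth d after the matching ')' (pvSgS's consumed count)
theorem pvFindAux_depth : ∀ (n : Nat) (l : List Char), l.length ≤ n → ∀ (d j : Nat),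
    pvFindAux pvKW l ((d : Int) + 1) j
      = pvFindAux pvKW (pvSgS l).1.2 (d : Int) (j + (pvSgS l).1.1) := by
  intro n
  induction n with
  | zero =>
    intro l hl d j
    have : l = [] := List.eq_nil_of_length_eq_zero (Nat.le_zero.mp hl)
    subst this
    simp [pvFindAux, pvSgS_nil]
  | succ n ih =>
    intro l hl d j
    cases l with
    | nil => simp [pvFindAux, pvSgS_nil]
    | cons c tl =>
      simp only [List.length_cons, Nat.succ_le_succ_iff] at hl
      by_cases hr : c = ')'
      · subst hr
        rw [pvSgS_rparen, pvFindAux_rparen]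
        dsimp only
        rw [if_neg (by omega)]
        have hc : ((d : Int) + 1 - 1) = (d : Int) := by ring
        rw [hc]
      · by_cases hp : c = '('
        · subst hp
          rw [pvSgS_lparen, pvFindAux_lparen]
          dsimp only
          have hc : ((d : Int) + 1 + 1) = ((d + 1 : Nat) : Int) + 1 := by push_cast; ring
          rw [hc, ih tl hl (d + 1) (j + 1)]
          have hc2 : ((d + 1 : Nat) : Int) = ((d : Nat) : Int) + 1 := by push_cast; ring
          rw [hc2]
          have hq1 := (pvSgS tl).2
          rw [ih (pvSgS tl).1.2 (by omega) d (j + 1 + (pvSgS tl).1.1)]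
          congr 1
          omega
        · rw [pvSgS_other c tl hr hp, pvFindAux_other c tl _ j hr hp]
          rw [if_neg (by rintro ⟨h, _⟩; omega)]
          rw [ih tl hl d (j + 1)]
          congr 1
          omega

-- A's phase-1 loop at depth 0 computes exactly Source B's top-level jump scan
theorem pvFindAux_eq2 : ∀ (n : Nat) (l : List Char), l.length ≤ n → ∀ (j : Nat),
    pvFindAux pvKW l 0 j
      = (match pvFind2 l j with | some p => (p : Int) | none => -1) := by
  intro n
  induction n with
  | zero =>
    intro l hl j
    have : l = [] := List.eq_nil_of_length_eq_zero (Nat.le_zero.mp hl)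
    subst this
    simp [pvFindAux, pvFind2]
  | succ n ih =>
    intro l hl j
    cases l with
    | nil => simp [pvFindAux, pvFind2]
    | cons c tl =>
      simp only [List.length_cons, Nat.succ_le_succ_iff] at hl
      by_cases hr : c = ')'
      · subst hr
        rw [pvFindAux_rparen, pvFind2_rparen, if_pos (by omega)]
      · by_cases hp : c = '('
        · subst hp
          rw [pvFindAux_lparen, pvFind2_lparen]
          have hc : ((0 : Int) + 1) = ((0 : Nat) : Int) + 1 := by norm_num
          rw [hc, pvFindAux_depth n tl hl 0 (j + 1)]
          have hq1 := (pvSgS tl).2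
          have := ih (pvSgS tl).1.2 (by omega) (j + 1 + (pvSgS tl).1.1)
          simpa using this
        · rw [pvFindAux_other c tl 0 j hr hp, pvFind2_other c tl j hr hp]
          by_cases hsw : PySem.Chars.startswith (c :: tl) pvKW = true
          · rw [if_pos ⟨rfl, hsw⟩, if_pos hsw]
          · rw [if_neg (by rintro ⟨_, h⟩; exact hsw h), if_neg (by simp [hsw])]
            exact ih tl hl (j + 1)

-- A's phase-2 loop at depth d+1 likewise skips the current group
theorem pvCutAux_depth : ∀ (n : Nat) (l : List Char), l.length ≤ n → ∀ (urest : List Char) (d j : Nat),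
    pvCutAux pvTOKS l urest ((d : Int) + 1) j
      = pvCutAux pvTOKS (pvSgS l).1.2 (urest.drop (pvSgS l).1.1) (d : Int) (j + (pvSgS l).1.1) := by
  intro n
  induction n with
  | zero =>
    intro l hl urest d j
    have : l = [] := List.eq_nil_of_length_eq_zero (Nat.le_zero.mp hl)
    subst this
    simp [pvCutAux, pvSgS_nil]
  | succ n ih =>
    intro l hl urest d j
    cases l with
    | nil => simp [pvCutAux, pvSgS_nil]
    | cons c tl =>
      simp only [List.length_cons, Nat.succ_le_succ_iff] at hl
      by_cases hp : c = '('
      · subst hp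
        rw [pvSgS_lparen, pvCutAux_lparen]
        dsimp only
        have hc : ((d : Int) + 1 + 1) = ((d + 1 : Nat) : Int) + 1 := by push_cast; ring
        rw [hc, ih tl hl urest.tail (d + 1) (j + 1)]
        have hc2 : ((d + 1 : Nat) : Int) = ((d : Nat) : Int) + 1 := by push_cast; ring
        rw [hc2]
        have hq1 := (pvSgS tl).2
        rw [ih (pvSgS tl).1.2 (by omega) ((urest.tail).drop (pvSgS tl).1.1) d (j + 1 + (pvSgS tl).1.1)]
        rw [List.drop_drop, pvTailDrop]
        apply pvCutCongr
        · congr 1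
          omega
        · omega
      · by_cases hr : c = ')'
        · subst hr
          rw [pvSgS_rparen, pvCutAux_rparen]
          dsimp only
          rw [if_neg (by omega)]
          have hc : ((d : Int) + 1 - 1) = (d : Int) := by ring
          rw [hc, List.drop_one]
        · rw [pvSgS_other c tl hr hp, pvCutAux_other c tl urest _ j hr hp]
          dsimp only
          rw [if_neg (by rintro ⟨h, _⟩; omega)]
          rw [ih tl hl urest.tail d (j + 1)]
          rw [pvTailDrop]
          apply pvCutCongr
          · congr 1
            omega
          · omega

-- A's phase-2 loop at depth 0 computes exactly Source B's top-level jump scan for the cut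
theorem pvCutAux_eq2 : ∀ (n : Nat) (l : List Char), l.length ≤ n → ∀ (urest : List Char) (j : Nat),
    pvCutAux pvTOKS l urest 0 j = pvCut2 l urest j := by
  intro n
  induction n with
  | zero =>
    intro l hl urest j
    have : l = [] := List.eq_nil_of_length_eq_zero (Nat.le_zero.mp hl)
    subst this
    simp [pvCutAux, pvCut2]
  | succ n ih =>
    intro l hl urest j
    cases l with
    | nil => simp [pvCutAux, pvCut2]
    | cons c tl =>
      simp only [List.length_cons, Nat.succ_le_succ_iff] at hl
      by_cases hp : c = '('
      · subst hp
        rw [pvCutAux_lparen, pvCut2_lparen]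
        have hc : ((0 : Int) + 1) = ((0 : Nat) : Int) + 1 := by norm_num
        rw [hc, pvCutAux_depth n tl hl urest.tail 0 (j + 1)]
        have hq1 := (pvSgS tl).2
        have := ih (pvSgS tl).1.2 (by omega) ((urest.tail).drop (pvSgS tl).1.1) (j + 1 + (pvSgS tl).1.1)
        rw [pvTailDrop] at this
        simp only [Nat.cast_zero]
        rw [pvTailDrop, this]
        apply pvCut2Congr
        · congr 1
          omega
        · omega
      · by_cases hr : c = ')'
        · subst hr
          rw [pvCutAux_rparen, pvCut2_rparen, if_pos rfl]
        · rw [pvCutAux_other c tl urest 0 j hr hp, pvCut2_other c tl urest j hr hp]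
          by_cases hsw : pvTOKS.any (fun t => PySem.Chars.startswith urest t) = true
          · rw [if_pos ⟨rfl, hsw⟩, if_pos hsw]
          · rw [if_neg (by rintro ⟨_, h⟩; exact hsw h), if_neg (by simp [hsw])]
            exact ih tl hl urest.tail (j + 1)

-- ===== VERDICT (by name: the statement is the Claim_ definition above) =====
theorem slice_order_by_scoped_py_spec : Claim_equal_slice_order_by_scoped_py := by
  unfold Claim_equal_slice_order_by_scoped_py
  intro s _
  unfold Spec_slice_order_by_scoped_py
  unfold slice_order_by_scoped_py slice_order_by_scoped_py_alt
  set sl := s.toList with hsl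
  set u := PySem.Chars.upper sl with hu
  dsimp only
  have hkw : " ORDER BY ".toList = pvKW := rfl
  have htoks : [" OFFSET".toList, " FETCH".toList, " UNION".toList, " EXCEPT".toList,
      " INTERSECT".toList, ";".toList] = pvTOKS := rfl
  rw [hkw, htoks]
  rw [pvFindAux_eq2 u.length u le_rfl 0]
  cases hf : pvFind2 u 0 with
  | none => simp
  | some p =>
    dsimp only
    rw [if_neg (Int.not_lt.mpr (Int.natCast_nonneg p)), Int.toNat_natCast]
    rw [pvCutAux_eq2 (sl.drop (p + pvKW.length)).length _ le_rfl (u.drop (p + pvKW.length)) (p + pvKW.length)]
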